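-- pv_equiv track=rewrite | github.com/RotterPotter/pokerbot | service.py | generate_auto_ranges
-- ===== SOURCE A (Python) =====
-- def generate_auto_ranges(board_cards, hole_cards, player_role):
--     """
--     Automatically generate OOP and IP ranges given a board and hero hole cards.
--
--     :param board_cards: List[str] - The community cards on the board (e.g. ["Ks", "9s", "8d", "Qd"]).
--     :param hole_cards:  List[str] - The 2 known hole cards for exactly one player (e.g. ["Ah", "Kh"]).
--     :param player_role: str       - The role of the player with the known hole cards: "OOP" or "IP".
--
--     :return: dict with two keys:
--             {
--             "OOP": [...],  # all combos (in condensed form) for OOP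
--             "IP":  [...],  # all combos (in condensed form) for IP
--             }
--     """
--     import itertools
--
--     # ------------------------------
--     # 1) Basic definitions
--     # ------------------------------
--     ranks = "AKQJT98765432"  # Descending rank order
--     suits = "shdc"           # Suit order doesn't matter much, but let's define it
--     used_cards = set(board_cards + hole_cards)  # All blocked cards
--
--     # ------------------------------
--     # 2) Utility to condense a 2-card hand
--     #    e.g. condense_2card_hand("Jh","Kh") -> "KJs"
--     # ------------------------------
--     def condense_2card_hand(card1, card2):
--         """
--         Given two explicit cards like "Jh" (Jack of hearts) and "Kh" (King of hearts),
--         return condensed notation like "KJs" if they are suited, "KJo" if off-suit,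
--         or "JJ" / "KK" for pairs.
--         """
--         rank1, suit1 = card1[0], card1[1]
--         rank2, suit2 = card2[0], card2[1]
--         idx1 = ranks.index(rank1)
--         idx2 = ranks.index(rank2)
--
--         # Pocket pair case
--         if rank1 == rank2:
--             return rank1 + rank2  # e.g. "JJ", "KK"
--
--         # Otherwise figure out which rank is higher (lower index in 'ranks')
--         if idx1 < idx2:
--             high_rank, low_rank = rank1, rank2
--             high_suit, low_suit = suit1, suit2
--         else:
--             high_rank, low_rank = rank2, rank1
--             high_suit, low_suit = suit2, suit1
--
--         # Check if suits match
--         if high_suit == low_suit: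
--             return high_rank + low_rank + 's'
--         else:
--             return high_rank + low_rank + 'o'
--
--     # ------------------------------
--     # 3) Build a deck and remove used_cards
--     # ------------------------------
--     full_deck = [r + s for r in ranks for s in suits]  # e.g. "As", "Ah", "Ad", "Ac", "Ks", ...
--     available_cards = [c for c in full_deck if c not in used_cards]
--
--     # ------------------------------
--     # 4) Generate all possible combos from the remaining deck
--     # ------------------------------
--     valid_condensed_combos = set()
--     for c1, c2 in itertools.combinations(available_cards, 2):
--         combo = condense_2card_hand(c1, c2)
--         valid_condensed_combos.add(combo)
--
--     # Convert the hero hole cards into condensed notation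
--     hero_combo = condense_2card_hand(hole_cards[0], hole_cards[1])
--
--     # ------------------------------
--     # 5) Assign ranges based on player_role
--     # ------------------------------
--     # The known hole cards should go to whichever role the hero is playing;
--     # the other role gets the full filtered range.
--     if player_role == "OOP":
--         oop_range = [hero_combo]
--         ip_range  = sorted(valid_condensed_combos)
--     else:  # player_role == "IP"
--         oop_range = sorted(valid_condensed_combos)
--         ip_range  = [hero_combo]
--
--     return {
--         "OOP": oop_range,
--         "IP":  ip_range
--     }
-- ===== SOURCE B (Python) =====
-- def generate_auto_ranges(board_cards, hole_cards, player_role):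
--     ranks = "AKQJT98765432"
--     used = set(board_cards) | set(hole_cards)
--     avail = {r: [s for s in "shdc" if r + s not in used] for r in ranks}
--
--     def condense_2card_hand(card1, card2):
--         rank1, suit1 = card1[0], card1[1]
--         rank2, suit2 = card2[0], card2[1]
--         idx1, idx2 = ranks.index(rank1), ranks.index(rank2)
--         if rank1 == rank2:
--             return rank1 + rank2
--         high, low = (rank1, rank2) if idx1 < idx2 else (rank2, rank1)
--         return high + low + ('s' if suit1 == suit2 else 'o')
--
--     combos = []
--     for i, hi in enumerate(ranks):
--         a = avail[hi]
--         if len(a) >= 2: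
--             combos.append(hi + hi)
--         for lo in ranks[i + 1:]:
--             b = avail[lo]
--             if not a or not b:
--                 continue
--             if any(s in b for s in a):
--                 combos.append(hi + lo + 's')
--             if len(a) > 1 or len(b) > 1 or a[:1] != b[:1]:
--                 combos.append(hi + lo + 'o')
--
--     hero_combo = condense_2card_hand(hole_cards[0], hole_cards[1])
--     full_range = sorted(combos)
--     if player_role == "OOP":
--         return {"OOP": [hero_combo], "IP": full_range}
--     return {"OOP": full_range, "IP": [hero_combo]}
-- ===== Notes on version B (the rewrite author's own statement) =====
-- stated objective: faster
-- what changed: Replaces A's scan over all C(available,2)~1326 two-card combinations (condensing each pair into a set) by a per-rank table of still-available suits: pocket pair iff a rank keeps >=2 suits, suited iff the two ranks share an available suit, offsuit unless both ranks are down to the same single suit.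
import Mathlib
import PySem

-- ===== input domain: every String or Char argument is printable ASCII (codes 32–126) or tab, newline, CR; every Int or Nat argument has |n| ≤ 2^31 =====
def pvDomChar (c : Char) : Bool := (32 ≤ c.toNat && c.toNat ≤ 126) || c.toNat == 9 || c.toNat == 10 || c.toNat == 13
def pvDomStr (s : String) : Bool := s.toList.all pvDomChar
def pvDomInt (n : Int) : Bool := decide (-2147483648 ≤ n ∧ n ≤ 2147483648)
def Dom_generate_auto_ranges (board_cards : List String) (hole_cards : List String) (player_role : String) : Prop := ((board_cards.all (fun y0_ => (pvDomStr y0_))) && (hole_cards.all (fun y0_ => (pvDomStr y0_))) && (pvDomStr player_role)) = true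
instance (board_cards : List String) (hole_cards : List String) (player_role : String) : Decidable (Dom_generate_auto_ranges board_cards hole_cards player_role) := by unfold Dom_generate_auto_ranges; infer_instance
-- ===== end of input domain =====

-- B replaces A's scan over all 1326 two-card combinations by per-rank available-suit lists
-- (pocket pair iff ≥2 suits left; suited iff a shared suit; offsuit unless both ranks are down
-- to the same single suit); same return value, proved equal on all inputs where A returns.

-- ===== PORT A =====
-- shared helper: the literal port of condense_2card_hand (identical nested function in Source A and Source B);
-- none = the Python raises (IndexError on a short card string / ValueError from ranks.index)
def pvCondense? (card1 card2 : String) : Option String :=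
  match PySem.Str.pyGet? card1 0, PySem.Str.pyGet? card1 1,
        PySem.Str.pyGet? card2 0, PySem.Str.pyGet? card2 1 with
  | some rank1, some suit1, some rank2, some suit2 =>
    match PySem.List.index? "AKQJT98765432".toList rank1,
          PySem.List.index? "AKQJT98765432".toList rank2 with
    | some idx1, some idx2 =>
        if rank1 = rank2 then some (String.ofList [rank1, rank2])
        else if idx1 < idx2 then
          some (String.ofList [rank1, rank2, if suit1 = suit2 then 's' else 'o'])
        else
          some (String.ofList [rank2, rank1, if suit2 = suit1 then 's' else 'o'])
    | _, _ => none
  | _, _, _, _ => none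

-- 'for c1, c2 in itertools.combinations(...)' tuple unpacking ('' is never used: combinations … 2 yields pairs)
def pvCondensePair (c : List String) : String :=
  match c with
  | c1 :: c2 :: _ => (pvCondense? c1 c2).getD ""
  | _ => ""

def generate_auto_ranges (board_cards : List String) (hole_cards : List String) (player_role : String) : List (String × List String) :=
  let used : PySem.Set String := PySem.Set.ofList (board_cards ++ hole_cards)
  let full_deck : List String :=
    "AKQJT98765432".toList.flatMap (fun r => "shdc".toList.map (fun s => String.ofList [r, s]))
  let available_cards := full_deck.filter (fun c => !(PySem.Set.contains used c))
  let valid : PySem.Set String :=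
    (PySem.List.combinations available_cards 2).foldl
      (fun st c => PySem.Set.add st (pvCondensePair c)) PySem.Set.empty
  match PySem.List.pyGet? hole_cards 0, PySem.List.pyGet? hole_cards 1 with
  | some h0, some h1 =>
    match pvCondense? h0 h1 with
    | some hero =>
        if player_role = "OOP" then
          [("OOP", [hero]), ("IP", PySem.List.sorted valid (fun x => x) false)]
        else
          [("OOP", PySem.List.sorted valid (fun x => x) false), ("IP", [hero])]
    | none => []  -- unreachable under Pre_: the Python raises here
  | _, _ => []    -- unreachable under Pre_: the Python raises here

-- ===== PORT B =====
def pvAvail (used : PySem.Set String) (r : Char) : List Char :=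
  "shdc".toList.filter (fun s => !(PySem.Set.contains used (String.ofList [r, s])))

-- the double loop 'for i, hi in enumerate(ranks): … for lo in ranks[i+1:]: …' as structural
-- recursion (at step i the tail of the rank list IS ranks[i+1:])
def pvBuild (used : PySem.Set String) : List Char → List String
  | [] => []
  | hi :: rest =>
      ((if 2 ≤ (pvAvail used hi).length then [String.ofList [hi, hi]] else []) ++
       rest.flatMap (fun lo =>
         if (pvAvail used hi).isEmpty || (pvAvail used lo).isEmpty then []
         else
           (if (pvAvail used hi).any (fun s => (pvAvail used lo).contains s)
            then [String.ofList [hi, lo, 's']] else []) ++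
           (if 1 < (pvAvail used hi).length ∨ 1 < (pvAvail used lo).length ∨
               (pvAvail used hi).take 1 ≠ (pvAvail used lo).take 1
            then [String.ofList [hi, lo, 'o']] else [])))
      ++ pvBuild used rest

def generate_auto_ranges_alt (board_cards : List String) (hole_cards : List String) (player_role : String) : List (String × List String) :=
  let used : PySem.Set String := PySem.Set.union (PySem.Set.ofList board_cards) hole_cards
  let combos := pvBuild used "AKQJT98765432".toList
  match PySem.List.pyGet? hole_cards 0, PySem.List.pyGet? hole_cards 1 with
  | some h0, some h1 =>
    match pvCondense? h0 h1 with
    | some hero =>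
        if player_role = "OOP" then
          [("OOP", [hero]), ("IP", PySem.List.sorted combos (fun x => x) false)]
        else
          [("OOP", PySem.List.sorted combos (fun x => x) false), ("IP", [hero])]
    | none => []
  | _, _ => []

-- ===== PRECONDITION & SPEC =====
-- a hole card the Python can condense: at least 2 characters and a first character that is a rank
def pvOkCard (c : String) : Bool :=
  match c.toList with
  | r :: _ :: _ => "AKQJT98765432".toList.contains r
  | _ => false

-- Pre_ excludes exactly the inputs on which A raises: fewer than two hole cards (IndexError),
-- a hole card shorter than 2 chars (IndexError) or whose first char is not a rank (ValueError)
def Pre_generate_auto_ranges (board_cards : List String) (hole_cards : List String) (player_role : String) : Prop :=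
  2 ≤ hole_cards.length ∧ pvOkCard (hole_cards.getD 0 "") = true ∧ pvOkCard (hole_cards.getD 1 "") = true
instance (board_cards : List String) (hole_cards : List String) (player_role : String) : Decidable (Pre_generate_auto_ranges board_cards hole_cards player_role) := by unfold Pre_generate_auto_ranges; infer_instance

def pvWitness_generate_auto_ranges : List String × List String × String :=
  (["Ks", "9s", "8d"], ["Ah", "Kh"], "OOP")

def Spec_generate_auto_ranges (board_cards : List String) (hole_cards : List String) (player_role : String) (out : List (String × List String)) : Prop := out = generate_auto_ranges_alt board_cards hole_cards player_role
instance (board_cards : List String) (hole_cards : List String) (player_role : String) (out : List (String × List String)) : Decidable (Spec_generate_auto_ranges board_cards hole_cards player_role out) := by unfold Spec_generate_auto_ranges; infer_instance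

-- ===== CLAIM (what is proved, stated in full; the proofs are below) =====
def Claim_equal_generate_auto_ranges : Prop := ∀ (board_cards : List String) (hole_cards : List String) (player_role : String), Dom_generate_auto_ranges board_cards hole_cards player_role → Pre_generate_auto_ranges board_cards hole_cards player_role → Spec_generate_auto_ranges board_cards hole_cards player_role (generate_auto_ranges board_cards hole_cards player_role)

-- ===== LEMMAS AND PROOFS =====

-- suit availability as a predicate (pvAvail u r = "shdc".toList.filter (pvKeep u r) by rfl)
def pvKeep (u : PySem.Set String) (r s : Char) : Bool := !(PySem.Set.contains u (String.ofList [r, s]))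

-- [a,b] <+ x :: l
lemma pair_sublist_cons {α : Type} (a b x : α) (l : List α) :
    [a, b].Sublist (x :: l) ↔ (a = x ∧ b ∈ l) ∨ [a, b].Sublist l := by
  rw [List.sublist_cons_iff]
  constructor
  · rintro (h | ⟨r, hr, hs⟩)
    · exact Or.inr h
    · cases hr
      · exact Or.inl ⟨rfl, (List.singleton_sublist).1 hs⟩
  · rintro (⟨rfl, hb⟩ | h)
    · exact Or.inr ⟨[b], rfl, (List.singleton_sublist).2 hb⟩
    · exact Or.inl h

-- [a,b] <+ l1 ++ l2
lemma pair_sublist_append {α : Type} (a b : α) (l1 l2 : List α) :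
    [a, b].Sublist (l1 ++ l2) ↔
      [a, b].Sublist l1 ∨ (a ∈ l1 ∧ b ∈ l2) ∨ [a, b].Sublist l2 := by
  induction l1 with
  | nil => simp
  | cons x t ih =>
      simp only [List.cons_append, pair_sublist_cons, ih, List.mem_append, List.mem_cons]
      tauto

lemma pair_sublist_map {α γ : Type} (f : α → γ) (a b : γ) (l : List α) :
    [a, b].Sublist (l.map f) ↔ ∃ s1 s2, [s1, s2].Sublist l ∧ a = f s1 ∧ b = f s2 := by
  rw [List.sublist_map_iff]
  constructor
  · rintro ⟨l', hs, he⟩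
    match l', he with
    | [s1, s2], he =>
      simp only [List.map_cons, List.map_nil, List.cons.injEq, and_true] at he
      exact ⟨s1, s2, hs, he.1, he.2⟩
  · rintro ⟨s1, s2, hs, rfl, rfl⟩
    exact ⟨[s1, s2], hs, rfl⟩

-- pair sublists of the rank-major deck
lemma pair_sublist_deck {α β γ : Type} (f : α → β → γ) (S : List β) :
    ∀ (rs : List α) (a b : γ),
      ([a, b].Sublist (rs.flatMap (fun r => S.map (f r))) ↔
        ((∃ r ∈ rs, ∃ s1 s2, [s1, s2].Sublist S ∧ a = f r s1 ∧ b = f r s2) ∨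
         (∃ r1 r2, [r1, r2].Sublist rs ∧ (∃ s1 ∈ S, a = f r1 s1) ∧ (∃ s2 ∈ S, b = f r2 s2)))) := by
  intro rs
  induction rs with
  | nil => simp
  | cons r t ih =>
      intro a b
      rw [List.flatMap_cons, pair_sublist_append, pair_sublist_map, ih]
      constructor
      · rintro (⟨s1, s2, hs, rfl, rfl⟩ | ⟨ha, hb⟩ | h)
        · exact Or.inl ⟨r, by simp, s1, s2, hs, rfl, rfl⟩
        · obtain ⟨s1, hs1, rfl⟩ := by simpa using ha
          obtain ⟨r2, hr2, s2, hs2, rfl⟩ := by simpa using hb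
          exact Or.inr ⟨r, r2, (pair_sublist_cons ..).2 (Or.inl ⟨rfl, hr2⟩),
            ⟨s1, hs1, rfl⟩, ⟨s2, hs2, rfl⟩⟩
        · rcases h with ⟨r0, hr0, s1, s2, hs, rfl, rfl⟩ | ⟨r1, r2, hrr, h1, h2⟩
          · exact Or.inl ⟨r0, by simp [hr0], s1, s2, hs, rfl, rfl⟩
          · exact Or.inr ⟨r1, r2, (pair_sublist_cons ..).2 (Or.inr hrr), h1, h2⟩
      · rintro (⟨r0, hr0, s1, s2, hs, rfl, rfl⟩ | ⟨r1, r2, hrr, ⟨s1, hs1, rfl⟩, ⟨s2, hs2, rfl⟩⟩)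
        · rcases List.mem_cons.1 hr0 with rfl | hr0
          · exact Or.inl ⟨s1, s2, hs, rfl, rfl⟩
          · exact Or.inr (Or.inr (Or.inl ⟨r0, hr0, s1, s2, hs, rfl, rfl⟩))
        · rcases (pair_sublist_cons ..).1 hrr with ⟨rfl, hr2⟩ | hrr
          · refine Or.inr (Or.inl ⟨?_, ?_⟩)
            · exact List.mem_map.2 ⟨s1, hs1, rfl⟩
            · simp only [List.mem_flatMap, List.mem_map]
              exact ⟨r2, hr2, s2, hs2, rfl⟩
          · exact Or.inr (Or.inr (Or.inr ⟨r1, r2, hrr, ⟨s1, hs1, rfl⟩, ⟨s2, hs2, rfl⟩⟩))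

lemma pair_sublist_filter {α : Type} (p : α → Bool) (a b : α) (l : List α) :
    [a, b].Sublist (l.filter p) ↔ [a, b].Sublist l ∧ p a = true ∧ p b = true := by
  constructor
  · intro h
    refine ⟨h.trans List.filter_sublist, ?_, ?_⟩
    · exact (List.mem_filter.1 (h.subset (by simp))).2
    · exact (List.mem_filter.1 (h.subset (by simp))).2
  · rintro ⟨h, ha, hb⟩
    have h2 := h.filter p
    simpa [List.filter_cons, ha, hb] using h2

-- order of a pair-sublist of a Nodup list, through index?
lemma index_lt_of_pair_sublist {α : Type} [BEq α] [LawfulBEq α] (x y : α) :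
    ∀ (l : List α), l.Nodup → [x, y].Sublist l →
      ∃ i j, PySem.List.index? l x = some i ∧ PySem.List.index? l y = some j ∧ i < j := by
  intro l
  induction l with
  | nil => intro _ h; simp at h
  | cons c t ih =>
      intro hnd h
      rw [pair_sublist_cons] at h
      rcases h with ⟨rfl, hy⟩ | h
      · have hyx : x ≠ y := by rintro rfl; exact (List.nodup_cons.1 hnd).1 hy
        obtain ⟨j, hj⟩ := Option.isSome_iff_exists.1 ((PySem.List.index?_isSome_iff t y).2 hy)
        refine ⟨0, j + 1, PySem.List.index?_cons_self .., ?_, by omega⟩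
        rw [PySem.List.index?_cons_of_ne _ hyx, hj]; rfl
      · obtain ⟨i, j, hi, hj, hij⟩ := ih (List.nodup_cons.1 hnd).2 h
        have hx : x ∈ t := h.subset (by simp)
        have hy : y ∈ t := h.subset (by simp)
        have hcx : c ≠ x := by rintro rfl; exact (List.nodup_cons.1 hnd).1 hx
        have hcy : c ≠ y := by rintro rfl; exact (List.nodup_cons.1 hnd).1 hy
        refine ⟨i + 1, j + 1, ?_, ?_, by omega⟩
        · rw [PySem.List.index?_cons_of_ne _ hcx, hi]; rfl
        · rw [PySem.List.index?_cons_of_ne _ hcy, hj]; rfl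

lemma pyGet_card0 (r s : Char) : PySem.Str.pyGet? (String.ofList [r, s]) 0 = some r := by
  simp [PySem.List.pyGet?, PySem.List.pyIdx?]
lemma pyGet_card1 (r s : Char) : PySem.Str.pyGet? (String.ofList [r, s]) 1 = some s := by
  simp [PySem.List.pyGet?, PySem.List.pyIdx?]

-- condense on two constructed same-rank cards
lemma condense_pair_same (r s1 s2 : Char) (hr : r ∈ "AKQJT98765432".toList) :
    pvCondense? (String.ofList [r, s1]) (String.ofList [r, s2]) = some (String.ofList [r, r]) := by
  obtain ⟨k, hk⟩ := Option.isSome_iff_exists.1 ((PySem.List.index?_isSome_iff _ _).2 hr)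
  unfold pvCondense?
  rw [pyGet_card0, pyGet_card1, pyGet_card0, pyGet_card1]
  simp at hk
  simp [hk]

-- condense on two constructed cards with ranks in deck order
lemma condense_pair_cross (r1 r2 s1 s2 : Char)
    (h : [r1, r2].Sublist "AKQJT98765432".toList) :
    pvCondense? (String.ofList [r1, s1]) (String.ofList [r2, s2]) =
      some (String.ofList [r1, r2, if s1 = s2 then 's' else 'o']) := by
  obtain ⟨i, j, hi, hj, hij⟩ := index_lt_of_pair_sublist r1 r2 _ (by decide) h
  have hne : r1 ≠ r2 := by
    rintro rfl; rw [hi] at hj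
    exact absurd (Option.some.inj hj) (by omega)
  unfold pvCondense?
  rw [pyGet_card0, pyGet_card1, pyGet_card0, pyGet_card1]
  simp at hi hj
  simp [hi, hj, hne, hij]

-- membership in A's condensed set
lemma memA_iff (u : PySem.Set String) (x : String) :
    (x ∈ (PySem.List.combinations
        (("AKQJT98765432".toList.flatMap (fun r => "shdc".toList.map (fun s => String.ofList [r, s]))).filter
          (fun c => !(PySem.Set.contains u c))) 2).foldl
        (fun st c => PySem.Set.add st (pvCondensePair c)) PySem.Set.empty) ↔
      ((∃ r ∈ "AKQJT98765432".toList, ∃ s1 s2, [s1, s2].Sublist "shdc".toList ∧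
          pvKeep u r s1 = true ∧ pvKeep u r s2 = true ∧ x = String.ofList [r, r]) ∨
       (∃ r1 r2, [r1, r2].Sublist "AKQJT98765432".toList ∧
          ∃ s1 ∈ "shdc".toList, ∃ s2 ∈ "shdc".toList,
            pvKeep u r1 s1 = true ∧ pvKeep u r2 s2 = true ∧
            x = String.ofList [r1, r2, if s1 = s2 then 's' else 'o'])) := by
  rw [PySem.Set.mem_foldl_add]
  constructor
  · rintro (h | ⟨c, hc, rfl⟩)
    · simp [PySem.Set.empty] at h
    · obtain ⟨hsub, hlen⟩ := (PySem.List.mem_combinations_iff _ _ _).1 hc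
      match c, hlen with
      | [a, b], _ =>
        rw [pair_sublist_filter] at hsub
        obtain ⟨hdk, ha, hb⟩ := hsub
        rw [pair_sublist_deck] at hdk
        rcases hdk with ⟨r, hr, s1, s2, hs, rfl, rfl⟩ | ⟨r1, r2, hrr, ⟨s1, hs1, rfl⟩, ⟨s2, hs2, rfl⟩⟩
        · refine Or.inl ⟨r, hr, s1, s2, hs, ha, hb, ?_⟩
          simp [pvCondensePair, condense_pair_same _ s1 s2 hr]
        · refine Or.inr ⟨r1, r2, hrr, s1, hs1, s2, hs2, ha, hb, ?_⟩
          simp [pvCondensePair, condense_pair_cross _ _ _ _ hrr]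
  · rintro (⟨r, hr, s1, s2, hs, k1, k2, rfl⟩ | ⟨r1, r2, hrr, s1, hs1, s2, hs2, k1, k2, rfl⟩)
    · refine Or.inr ⟨[String.ofList [r, s1], String.ofList [r, s2]], ?_, ?_⟩
      · refine (PySem.List.mem_combinations_iff _ _ _).2 ⟨?_, rfl⟩
        exact (pair_sublist_filter _ _ _ _).2
          ⟨(pair_sublist_deck _ _ _ _ _).2 (Or.inl ⟨r, hr, s1, s2, hs, rfl, rfl⟩), k1, k2⟩
      · simp [pvCondensePair, condense_pair_same _ s1 s2 hr]
    · refine Or.inr ⟨[String.ofList [r1, s1], String.ofList [r2, s2]], ?_, ?_⟩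
      · refine (PySem.List.mem_combinations_iff _ _ _).2 ⟨?_, rfl⟩
        exact (pair_sublist_filter _ _ _ _).2
          ⟨(pair_sublist_deck _ _ _ _ _).2
            (Or.inr ⟨r1, r2, hrr, ⟨s1, hs1, rfl⟩, ⟨s2, hs2, rfl⟩⟩), k1, k2⟩
      · simp [pvCondensePair, condense_pair_cross _ _ _ _ hrr]

-- membership in B's combo list
lemma memB_iff (u : PySem.Set String) (x : String) : ∀ (rs : List Char),
    (x ∈ pvBuild u rs ↔
      ((∃ r ∈ rs, 2 ≤ (pvAvail u r).length ∧ x = String.ofList [r, r]) ∨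
       (∃ r1 r2, [r1, r2].Sublist rs ∧
          (pvAvail u r1).isEmpty = false ∧ (pvAvail u r2).isEmpty = false ∧
          (((pvAvail u r1).any (fun s => (pvAvail u r2).contains s) = true ∧ x = String.ofList [r1, r2, 's']) ∨
           ((1 < (pvAvail u r1).length ∨ 1 < (pvAvail u r2).length ∨
              (pvAvail u r1).take 1 ≠ (pvAvail u r2).take 1) ∧ x = String.ofList [r1, r2, 'o']))))) := by
  intro rs
  induction rs with
  | nil => simp [pvBuild]
  | cons hi rest ih =>
      have h1 : x ∈ (if 2 ≤ (pvAvail u hi).length then [String.ofList [hi, hi]] else []) ↔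
          (2 ≤ (pvAvail u hi).length ∧ x = String.ofList [hi, hi]) := by
        split_ifs with h <;> simp [h]
      have h2 : ∀ lo, x ∈ (if (pvAvail u hi).isEmpty || (pvAvail u lo).isEmpty then ([] : List String)
            else
              (if (pvAvail u hi).any (fun s => (pvAvail u lo).contains s)
               then [String.ofList [hi, lo, 's']] else []) ++
              (if 1 < (pvAvail u hi).length ∨ 1 < (pvAvail u lo).length ∨
                  (pvAvail u hi).take 1 ≠ (pvAvail u lo).take 1
               then [String.ofList [hi, lo, 'o']] else [])) ↔
          ((pvAvail u hi).isEmpty = false ∧ (pvAvail u lo).isEmpty = false ∧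
           (((pvAvail u hi).any (fun s => (pvAvail u lo).contains s) = true ∧ x = String.ofList [hi, lo, 's']) ∨
            ((1 < (pvAvail u hi).length ∨ 1 < (pvAvail u lo).length ∨
               (pvAvail u hi).take 1 ≠ (pvAvail u lo).take 1) ∧ x = String.ofList [hi, lo, 'o']))) := by
        intro lo
        cases e1 : (pvAvail u hi).isEmpty <;> cases e2 : (pvAvail u lo).isEmpty <;>
            simp [e1, e2] <;> split_ifs with hA hB <;> simp_all
      rw [pvBuild]
      simp only [List.append_assoc, List.mem_append, List.mem_flatMap, h1, ih]
      constructor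
      · rintro (⟨hlen, rfl⟩ | ⟨lo, hlo, hg⟩ | hrec)
        · exact Or.inl ⟨hi, List.mem_cons_self .., hlen, rfl⟩
        · obtain ⟨e1, e2, hin⟩ := (h2 lo).1 hg
          exact Or.inr ⟨hi, lo, (pair_sublist_cons ..).2 (Or.inl ⟨rfl, hlo⟩), e1, e2, hin⟩
        · rcases hrec with ⟨r, hr, hlen, rfl⟩ | ⟨r1, r2, hrr, e1, e2, hin⟩
          · exact Or.inl ⟨r, List.mem_cons_of_mem _ hr, hlen, rfl⟩
          · exact Or.inr ⟨r1, r2, (pair_sublist_cons ..).2 (Or.inr hrr), e1, e2, hin⟩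
      · rintro (⟨r, hr, hlen, rfl⟩ | ⟨r1, r2, hrr, e1, e2, hin⟩)
        · rcases List.mem_cons.1 hr with rfl | hr
          · exact Or.inl ⟨hlen, rfl⟩
          · exact Or.inr (Or.inr (Or.inl ⟨r, hr, hlen, rfl⟩))
        · rcases (pair_sublist_cons ..).1 hrr with ⟨rfl, hr2⟩ | hrr
          · exact Or.inr (Or.inl ⟨r2, hr2, (h2 r2).2 ⟨e1, e2, hin⟩⟩)
          · exact Or.inr (Or.inr (Or.inr ⟨r1, r2, hrr, e1, e2, hin⟩))

-- suit-level boolean equivalences over the concrete suit list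
lemma suits_pair_iff (k : Char → Bool) :
    (∃ s1 s2, [s1, s2].Sublist "shdc".toList ∧ k s1 = true ∧ k s2 = true) ↔
      2 ≤ ("shdc".toList.filter k).length := by
  have hS : "shdc".toList = ['s','h','d','c'] := rfl
  rw [hS]
  cases h1 : k 's' <;> cases h2 : k 'h' <;> cases h3 : k 'd' <;> cases h4 : k 'c' <;>
    simp [pair_sublist_cons, h1, h2, h3, h4] <;> aesop

lemma suits_suited_iff (k1 k2 : Char → Bool) :
    (∃ s1 ∈ "shdc".toList, ∃ s2 ∈ "shdc".toList, k1 s1 = true ∧ k2 s2 = true ∧ s1 = s2) ↔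
      (("shdc".toList.filter k1).isEmpty = false ∧ ("shdc".toList.filter k2).isEmpty = false ∧
       ("shdc".toList.filter k1).any (fun s => ("shdc".toList.filter k2).contains s) = true) := by
  have hS : "shdc".toList = ['s','h','d','c'] := rfl
  rw [hS]
  cases h1 : k1 's' <;> cases h2 : k1 'h' <;> cases h3 : k1 'd' <;> cases h4 : k1 'c' <;>
  cases g1 : k2 's' <;> cases g2 : k2 'h' <;> cases g3 : k2 'd' <;> cases g4 : k2 'c' <;>
    simp [h1, h2, h3, h4, g1, g2, g3, g4] <;> aesop

set_option maxHeartbeats 1600000 in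
lemma suits_off_iff (k1 k2 : Char → Bool) :
    (∃ s1 ∈ "shdc".toList, ∃ s2 ∈ "shdc".toList, k1 s1 = true ∧ k2 s2 = true ∧ s1 ≠ s2) ↔
      (("shdc".toList.filter k1).isEmpty = false ∧ ("shdc".toList.filter k2).isEmpty = false ∧
       (1 < ("shdc".toList.filter k1).length ∨ 1 < ("shdc".toList.filter k2).length ∨
        ("shdc".toList.filter k1).take 1 ≠ ("shdc".toList.filter k2).take 1)) := by
  have hS : "shdc".toList = ['s','h','d','c'] := rfl
  rw [hS]
  cases h1 : k1 's' <;> cases h2 : k1 'h' <;> cases h3 : k1 'd' <;> cases h4 : k1 'c' <;>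
  cases g1 : k2 's' <;> cases g2 : k2 'h' <;> cases g3 : k2 'd' <;> cases g4 : k2 'c' <;>
    simp [h1, h2, h3, h4, g1, g2, g3, g4] <;> aesop

lemma pvOfList_inj {l1 l2 : List Char} : String.ofList l1 = String.ofList l2 ↔ l1 = l2 :=
  ⟨fun h => by simpa using congrArg String.toList h, fun h => by rw [h]⟩

-- the inner-loop contribution of the rank pair (hi, lo), named for the nodup proof
def pvG (u : PySem.Set String) (hi lo : Char) : List String :=
  if (pvAvail u hi).isEmpty || (pvAvail u lo).isEmpty then []
  else
    (if (pvAvail u hi).any (fun s => (pvAvail u lo).contains s)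
     then [String.ofList [hi, lo, 's']] else []) ++
    (if 1 < (pvAvail u hi).length ∨ 1 < (pvAvail u lo).length ∨
        (pvAvail u hi).take 1 ≠ (pvAvail u lo).take 1
     then [String.ofList [hi, lo, 'o']] else [])

lemma pvBuild_cons (u : PySem.Set String) (hi : Char) (rest : List Char) :
    pvBuild u (hi :: rest) =
      ((if 2 ≤ (pvAvail u hi).length then [String.ofList [hi, hi]] else []) ++
        rest.flatMap (pvG u hi)) ++ pvBuild u rest := rfl

lemma memG (u : PySem.Set String) (hi lo : Char) (x : String) (hx : x ∈ pvG u hi lo) :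
    x = String.ofList [hi, lo, 's'] ∨ x = String.ofList [hi, lo, 'o'] := by
  unfold pvG at hx
  split_ifs at hx <;> simp at hx <;> tauto

lemma nodupG (u : PySem.Set String) (hi lo : Char) : (pvG u hi lo).Nodup := by
  unfold pvG; split_ifs <;> simp [pvOfList_inj]

lemma nodupFlat (u : PySem.Set String) (hi : Char) :
    ∀ t : List Char, t.Nodup → (t.flatMap (pvG u hi)).Nodup := by
  intro t
  induction t with
  | nil => simp
  | cons lo t' ih =>
      intro h
      obtain ⟨hlo, h'⟩ := List.nodup_cons.1 h
      rw [List.flatMap_cons]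
      refine (nodupG u hi lo).append (ih h') ?_
      intro x hx hx'
      obtain ⟨lo', hlo', hg'⟩ := List.mem_flatMap.1 hx'
      rcases memG _ _ _ _ hx with rfl | rfl <;> rcases memG _ _ _ _ hg' with h3 | h3 <;>
        simp only [pvOfList_inj, List.cons.injEq, and_true, true_and] at h3
      · exact hlo (by rw [h3]; exact hlo')
      · exact absurd h3.2 (by decide)
      · exact absurd h3.2 (by decide)
      · exact hlo (by rw [h3]; exact hlo')

-- B's list has no duplicates
lemma nodup_build (u : PySem.Set String) : ∀ (rs : List Char), rs.Nodup → (pvBuild u rs).Nodup := by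
  intro rs
  induction rs with
  | nil => intro _; simp [pvBuild]
  | cons hi rest ih =>
      intro hnd
      obtain ⟨hhi, hnd'⟩ := List.nodup_cons.1 hnd
      rw [pvBuild_cons]
      have hc1 : (if 2 ≤ (pvAvail u hi).length then [String.ofList [hi, hi]] else []).Nodup := by
        split_ifs <;> simp
      refine (hc1.append (nodupFlat u hi rest hnd') ?_).append (ih hnd') ?_
      · -- the pocket-pair chunk and the cross chunk are disjoint (different lengths)
        intro x hx hx'
        split_ifs at hx <;> simp at hx
        subst hx
        obtain ⟨lo', _, hg'⟩ := List.mem_flatMap.1 hx'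
        rcases memG _ _ _ _ hg' with h3 | h3 <;>
          exact absurd (congrArg (fun t => t.toList.length) h3) (by simp)
      · -- the hi-chunks are disjoint from the recursive part (hi ∉ rest)
        intro x hx hrec
        have hrec' := ((memB_iff u x rest)).1 hrec
        rcases List.mem_append.1 hx with hx | hx
        · split_ifs at hx <;> simp at hx
          subst hx
          rcases hrec' with ⟨r, hr, -, hxx⟩ | ⟨r1, r2, hrr, -, -, hin⟩
          · rw [pvOfList_inj] at hxx
            simp only [List.cons.injEq] at hxx
            exact hhi (hxx.1 ▸ hr)
          · rcases hin with ⟨-, hxx⟩ | ⟨-, hxx⟩ <;>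
              exact absurd (congrArg (fun t => t.toList.length) hxx) (by simp)
        · obtain ⟨lo, hlo, hg⟩ := List.mem_flatMap.1 hx
          rcases memG _ _ _ _ hg with rfl | rfl <;>
            rcases hrec' with ⟨r, hr, -, hxx⟩ | ⟨r1, r2, hrr, -, -, hin⟩
          · exact absurd (congrArg (fun t => t.toList.length) hxx) (by simp)
          · rcases hin with ⟨-, hxx⟩ | ⟨-, hxx⟩ <;>
              simp only [pvOfList_inj, List.cons.injEq, and_true, true_and] at hxx
            · exact hhi (by rw [hxx.1]; exact hrr.subset (by simp))
            · exact absurd hxx.2.2 (by decide)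
          · exact absurd (congrArg (fun t => t.toList.length) hxx) (by simp)
          · rcases hin with ⟨-, hxx⟩ | ⟨-, hxx⟩ <;>
              simp only [pvOfList_inj, List.cons.injEq, and_true, true_and] at hxx
            · exact absurd hxx.2.2 (by decide)
            · exact hhi (by rw [hxx.1]; exact hrr.subset (by simp))

-- A's set has no duplicates
lemma nodup_foldl_add {α β : Type} [BEq α] [LawfulBEq α] (f : β → α) :
    ∀ (l : List β) (s : PySem.Set α), s.Nodup → (l.foldl (fun s b => PySem.Set.add s (f b)) s).Nodup := by
  intro l
  induction l with
  | nil => intro s hs; exact hs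
  | cons b t ih => intro s hs; exact ih _ (PySem.Set.nodup_add _ _ hs)

-- the two used-card sets are the same Set value
lemma used_eq (b h : List String) :
    PySem.Set.union (PySem.Set.ofList b) h = PySem.Set.ofList (b ++ h) := by
  rw [PySem.Set.ofList_append]; rfl

-- the central permutation
lemma perm_main (u : PySem.Set String) :
    ((PySem.List.combinations
        (("AKQJT98765432".toList.flatMap (fun r => "shdc".toList.map (fun s => String.ofList [r, s]))).filter
          (fun c => !(PySem.Set.contains u c))) 2).foldl
        (fun st c => PySem.Set.add st (pvCondensePair c)) PySem.Set.empty).Perm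
      (pvBuild u "AKQJT98765432".toList) := by
  rw [List.perm_ext_iff_of_nodup (nodup_foldl_add _ _ _ (by decide))
    (nodup_build u _ (by decide))]
  intro x
  rw [memA_iff, memB_iff]
  constructor
  · rintro (⟨r, hr, s1, s2, hs, k1, k2, rfl⟩ | ⟨r1, r2, hrr, s1, hs1, s2, hs2, k1, k2, rfl⟩)
    · exact Or.inl ⟨r, hr, (suits_pair_iff (pvKeep u r)).1 ⟨s1, s2, hs, k1, k2⟩, rfl⟩
    · by_cases hss : s1 = s2
      · obtain ⟨e1, e2, ha⟩ :=
          (suits_suited_iff (pvKeep u r1) (pvKeep u r2)).1 ⟨s1, hs1, s2, hs2, k1, k2, hss⟩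
        exact Or.inr ⟨r1, r2, hrr, e1, e2, Or.inl ⟨ha, by simp [hss]⟩⟩
      · obtain ⟨e1, e2, ha⟩ :=
          (suits_off_iff (pvKeep u r1) (pvKeep u r2)).1 ⟨s1, hs1, s2, hs2, k1, k2, hss⟩
        exact Or.inr ⟨r1, r2, hrr, e1, e2, Or.inr ⟨ha, by simp [hss]⟩⟩
  · rintro (⟨r, hr, hlen, rfl⟩ | ⟨r1, r2, hrr, e1, e2, hin⟩)
    · obtain ⟨s1, s2, hs, k1, k2⟩ := (suits_pair_iff (pvKeep u r)).2 hlen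
      exact Or.inl ⟨r, hr, s1, s2, hs, k1, k2, rfl⟩
    · rcases hin with ⟨ha, rfl⟩ | ⟨ha, rfl⟩
      · obtain ⟨s1, hs1, s2, hs2, k1, k2, hss⟩ :=
          (suits_suited_iff (pvKeep u r1) (pvKeep u r2)).2 ⟨e1, e2, ha⟩
        exact Or.inr ⟨r1, r2, hrr, s1, hs1, s2, hs2, k1, k2, by simp [hss]⟩
      · obtain ⟨s1, hs1, s2, hs2, k1, k2, hss⟩ :=
          (suits_off_iff (pvKeep u r1) (pvKeep u r2)).2 ⟨e1, e2, ha⟩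
        exact Or.inr ⟨r1, r2, hrr, s1, hs1, s2, hs2, k1, k2, by simp [hss]⟩

-- ===== VERDICT (by name: the statement is the Claim_ definition above) =====
theorem generate_auto_ranges_spec : Claim_equal_generate_auto_ranges := by
  intro board_cards hole_cards player_role _hdom _hpre
  unfold Spec_generate_auto_ranges generate_auto_ranges generate_auto_ranges_alt
  rw [used_eq]
  have hperm := (PySem.List.sorted_id_eq_sorted_id_iff_perm _ _).2 (perm_main (PySem.Set.ofList (board_cards ++ hole_cards)))
  simp only [hperm]
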